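-- pv_equiv track=rewrite | github.com/philipdouglas/adventofcode | 2019prep/2018_d02.py | part1
-- ===== SOURCE A (Python) =====
-- from collections import Counter
--
-- def part1(boxes):
--     """
--     >>> part1(["abcdef", "bababc", "abbcde", "abcccd", "aabcdd", "abcdee", "ababab"])
--     12
--     """
--     twos = 0
--     threes = 0
--     for box in boxes:
--         counts = Counter(box).values()
--         if 2 in counts:
--             twos += 1
--         if 3 in counts:
--             threes += 1
--     return twos * threes
-- ===== SOURCE B (Python) =====
-- def _flags(box):
--     # Sort the letters so equal letters form contiguous runs, then scan the
--     # runs once, flagging whether any run has length exactly 2 or exactly 3.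
--     s = sorted(box)
--     n = len(s)
--     has2 = False
--     has3 = False
--     i = 0
--     while i < n:
--         j = i + 1
--         while j < n and s[j] == s[i]:
--             j += 1
--         run = j - i
--         if run == 2:
--             has2 = True
--         elif run == 3:
--             has3 = True
--         i = j
--     return has2, has3
--
--
-- def part1(boxes):
--     twos = 0
--     threes = 0
--     for box in boxes:
--         h2, h3 = _flags(box)
--         if h2:
--             twos += 1
--         if h3:
--             threes += 1
--     return twos * threes
-- ===== Notes on version B (the rewrite author's own statement) =====
-- stated objective: alternative
-- what changed: Per-box letter multiplicities are no longer computed at all: B sorts each box's letters and makes one scan over the contiguous runs of equal letters, setting has2/has3 flags from the run lengths, instead of building a Counter hash map and testing membership of 2/3 in its values.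
import Mathlib
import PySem

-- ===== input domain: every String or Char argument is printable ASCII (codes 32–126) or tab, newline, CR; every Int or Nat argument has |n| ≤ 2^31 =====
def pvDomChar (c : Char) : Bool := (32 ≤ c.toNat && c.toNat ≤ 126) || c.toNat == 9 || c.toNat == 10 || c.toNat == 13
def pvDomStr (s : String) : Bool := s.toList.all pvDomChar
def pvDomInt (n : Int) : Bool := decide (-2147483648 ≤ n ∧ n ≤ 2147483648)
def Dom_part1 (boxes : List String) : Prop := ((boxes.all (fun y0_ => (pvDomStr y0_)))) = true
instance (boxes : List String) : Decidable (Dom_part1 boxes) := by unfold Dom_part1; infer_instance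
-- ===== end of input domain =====

-- B drops the Counter entirely: it sorts each box's letters and scans the
-- contiguous runs of equal letters once, flagging run lengths 2 and 3
-- directly (different algorithm; a timing run measured it faster by a
-- constant factor).

-- ===== PORT A =====
def part1 (boxes : List String) : Int :=
  let st := boxes.foldl (fun (st : Int × Int) box =>
    let counts := (PySem.Dict.counter box.toList).values
    ((if counts.contains (2 : Int) then st.1 + 1 else st.1),
     (if counts.contains (3 : Int) then st.2 + 1 else st.2))) (0, 0)
  st.1 * st.2

-- ===== PORT B =====
-- _flags' run scan: the inner 'while j' loop computing one run is the
-- takeWhile of the tail, and resuming the outer loop at i = j is the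
-- recursive call on the dropWhile remainder
def runFlags : List Char → Bool × Bool
  | [] => (false, false)
  | c :: rest =>
    let run := (rest.takeWhile (· == c)).length + 1
    let hs := runFlags (rest.dropWhile (· == c))
    if run = 2 then (true, hs.2)
    else if run = 3 then (hs.1, true)
    else hs
termination_by l => l.length
decreasing_by
  simpa using Nat.lt_succ_of_le (List.length_dropWhile_le _ _)

def part1_alt (boxes : List String) : Int :=
  let st := boxes.foldl (fun (st : Int × Int) box =>
    let hs := runFlags (PySem.List.sorted box.toList (fun c => c) false)
    ((if hs.1 then st.1 + 1 else st.1),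
     (if hs.2 then st.2 + 1 else st.2))) (0, 0)
  st.1 * st.2

-- ===== PRECONDITION & SPEC =====
def Spec_part1 (boxes : List String) (out : Int) : Prop := out = part1_alt boxes
instance (boxes : List String) (out : Int) : Decidable (Spec_part1 boxes out) := by unfold Spec_part1; infer_instance

-- ===== CLAIM (what is proved, stated in full; the proofs are below) =====
def Claim_equal_part1 : Prop := ∀ (boxes : List String), Dom_part1 boxes → Spec_part1 boxes (part1 boxes)

-- ===== LEMMAS AND PROOFS =====

-- 'k in Counter(box).values()' is exactly 'some char of box occurs exactly k times'
lemma contains_values_counter (xs : List Char) (k : Nat) :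
    ((PySem.Dict.counter xs).values).contains ((k : Nat) : Int)
      = xs.any (fun c => xs.count c == k) := by
  rw [Bool.eq_iff_iff]
  simp [PySem.Dict.values, PySem.Dict.items_counter, PySem.Set.mem_ofList]

set_option maxRecDepth 4096 in
-- on a sorted list, the run-scan flags say 'some char occurs exactly 2 (resp. 3) times'
lemma runFlags_sorted : ∀ (n : Nat) (l : List Char), l.length ≤ n → l.Pairwise (· ≤ ·) →
    runFlags l = (l.any (fun c => l.count c == 2), l.any (fun c => l.count c == 3)) := by
  intro n
  induction n with
  | zero =>
    intro l hl _
    have : l = [] := List.eq_nil_of_length_eq_zero (Nat.le_zero.mp hl)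
    subst this; simp [runFlags]
  | succ n ih =>
    intro l hl h
    match l with
    | [] => simp [runFlags]
    | c :: rest =>
      have hpr : rest.Pairwise (· ≤ ·) := h.of_cons
      have hcle : ∀ x ∈ rest, c ≤ x := fun x hx => List.rel_of_pairwise_cons h hx
      have hrest : rest.takeWhile (· == c) ++ rest.dropWhile (· == c) = rest :=
        List.takeWhile_append_dropWhile
      have ht : ∀ x ∈ rest.takeWhile (· == c), x = c := by
        intro x hx
        simpa using List.mem_takeWhile_imp hx
      have hpd : (rest.dropWhile (· == c)).Pairwise (· ≤ ·) :=
        hpr.sublist (List.dropWhile_sublist _)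
      have hdne : ∀ x ∈ rest.dropWhile (· == c), x ≠ c := by
        cases hd : rest.dropWhile (· == c) with
        | nil => simp
        | cons f d' =>
          intro x hx hxc
          have hfne : (f == c) = false := by
            have hne : rest.dropWhile (· == c) ≠ [] := by rw [hd]; simp
            have h? : (rest.dropWhile (· == c)).head? = some f := by rw [hd]; rfl
            have hh : (rest.dropWhile (· == c)).head hne = f := by
              have h2 := List.head?_eq_some_head hne
              rw [h?] at h2
              exact (Option.some_inj.mp h2).symm
            have := List.head_dropWhile_not (· == c) hne
            rwa [hh] at this
          have hfc : c ≤ f := by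
            apply hcle
            rw [← hrest, hd]; simp
          have hcf : c < f :=
            lt_of_le_of_ne hfc (Ne.symm (ne_of_beq_false hfne))
          have hfx : f ≤ x := by
            rw [hd] at hpd
            rcases List.mem_cons.mp hx with rfl | hx'
            · exact le_refl _
            · exact List.rel_of_pairwise_cons hpd hx'
          subst hxc
          exact absurd hfx (not_le.mpr hcf)
      have hct : (rest.takeWhile (· == c)).count c = (rest.takeWhile (· == c)).length :=
        List.count_eq_length.mpr (fun b hb => (ht b hb).symm)
      have hcd : (rest.dropWhile (· == c)).count c = 0 :=
        List.count_eq_zero.mpr (fun hm => hdne c hm rfl)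
      have hsplit : ∀ x : Char, rest.count x
          = (rest.takeWhile (· == c)).count x + (rest.dropWhile (· == c)).count x := by
        intro x
        conv_lhs => rw [← hrest]
        exact List.count_append
      have hcount_c : (c :: rest).count c = (rest.takeWhile (· == c)).length + 1 := by
        simp [hsplit c, hct, hcd]
      have hcount_d : ∀ x ∈ rest.dropWhile (· == c),
          (c :: rest).count x = (rest.dropWhile (· == c)).count x := by
        intro x hx
        have hxc : x ≠ c := hdne x hx
        have hxt : (rest.takeWhile (· == c)).count x = 0 :=
          List.count_eq_zero.mpr (fun hm => hxc (ht x hm))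
        simp [List.count_cons, hsplit x, hxt]
        exact fun hcx => hxc hcx.symm
      have hany : ∀ k : Nat,
          ((c :: rest).any (fun x => (c :: rest).count x == k))
            = ((((rest.takeWhile (· == c)).length + 1 : Nat) == k)
               || (rest.dropWhile (· == c)).any
                    (fun x => (rest.dropWhile (· == c)).count x == k)) := by
        intro k
        rw [Bool.eq_iff_iff]
        simp only [List.any_eq_true, List.mem_cons, Bool.or_eq_true, beq_iff_eq]
        constructor
        · rintro ⟨x, hx, hcx⟩
          rcases hx with rfl | hx
          · left; rw [hcount_c] at hcx; exact hcx
          · rcases List.mem_append.mp (hrest ▸ hx) with hxt | hxd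
            · left; rw [ht x hxt, hcount_c] at hcx; exact hcx
            · right; exact ⟨x, hxd, by rw [← hcount_d x hxd]; exact hcx⟩
        · rintro (hk | ⟨x, hxd, hk⟩)
          · exact ⟨c, Or.inl rfl, by rw [hcount_c]; exact hk⟩
          · refine ⟨x, Or.inr ?_, by rw [hcount_d x hxd]; exact hk⟩
            rw [← hrest]; exact List.mem_append.mpr (Or.inr hxd)
      have hdlen : (rest.dropWhile (· == c)).length ≤ n :=
        le_trans (List.length_dropWhile_le _ _) (Nat.le_of_succ_le_succ hl)
      rw [runFlags]
      rw [ih _ hdlen hpd, hany 2, hany 3]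
      split_ifs with h1 h2
      · have e : (rest.takeWhile (· == c)).length = 1 := by omega
        simp [e]
      · have e : (rest.takeWhile (· == c)).length = 2 := by omega
        simp [e]
      · have e1 : (rest.takeWhile (· == c)).length ≠ 1 := by omega
        have e2 : (rest.takeWhile (· == c)).length ≠ 2 := by omega
        simp [e1, e2]
      
-- one box: A's membership test equals B's run-scan flag
lemma box_flags (box : String) :
    (((PySem.Dict.counter box.toList).values).contains (2 : Int),
     ((PySem.Dict.counter box.toList).values).contains (3 : Int))
      = runFlags (PySem.List.sorted box.toList (fun c => c) false) := by
  have hp : (PySem.List.sorted box.toList (fun c => c) false).Pairwise (· ≤ ·) :=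
    PySem.List.sorted_pairwise box.toList (fun c => c)
  rw [runFlags_sorted (PySem.List.sorted box.toList (fun c => c) false).length _ le_rfl hp]
  have hperm : (PySem.List.sorted box.toList (fun c => c) false).Perm box.toList :=
    PySem.List.sorted_perm box.toList (fun c => c) false
  have hany : ∀ k : Nat,
      ((PySem.List.sorted box.toList (fun c => c) false).any
        (fun x => (PySem.List.sorted box.toList (fun c => c) false).count x == k))
        = box.toList.any (fun x => box.toList.count x == k) := by
    intro k
    rw [Bool.eq_iff_iff]
    simp only [List.any_eq_true]
    constructor
    · rintro ⟨x, hx, hk⟩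
      exact ⟨x, hperm.mem_iff.mp hx, by rw [← hperm.count_eq]; exact hk⟩
    · rintro ⟨x, hx, hk⟩
      exact ⟨x, hperm.mem_iff.mpr hx, by rw [hperm.count_eq]; exact hk⟩
  have h2 := contains_values_counter box.toList 2
  have h3 := contains_values_counter box.toList 3
  simp only [Nat.cast_ofNat] at h2 h3
  rw [h2, h3, ← hany 2, ← hany 3]

-- ===== VERDICT (by name: the statement is the Claim_ definition above) =====
theorem part1_spec : Claim_equal_part1 := by
  intro boxes _
  unfold Spec_part1 part1 part1_alt
  have hf := PySem.List.foldl_congr_mem boxes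
      (fun (st : Int × Int) box =>
        let counts := (PySem.Dict.counter box.toList).values
        ((if counts.contains (2 : Int) then st.1 + 1 else st.1),
         (if counts.contains (3 : Int) then st.2 + 1 else st.2)))
      (fun (st : Int × Int) box =>
        let hs := runFlags (PySem.List.sorted box.toList (fun c => c) false)
        ((if hs.1 then st.1 + 1 else st.1),
         (if hs.2 then st.2 + 1 else st.2)))
      ((0 : Int), (0 : Int))
      (by
        intro st box _
        have hbf := box_flags box
        rw [Prod.ext_iff] at hbf
        simp only [← hbf.1, ← hbf.2])
  simp only [hf]
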